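-- pv_equiv track=rewrite | github.com/emersonp/psu-python | F1EarliestModal.py | earliest_modal
-- ===== SOURCE A (Python) =====
-- def earliest_modal(sequence):
--   assert sequence
--   seq_dict = {}
--   max_index = 0
--   for key in sequence:
--     if key in seq_dict:
--       seq_dict[key] += 1
--     else:
--       seq_dict[key] = 1
--
--     if seq_dict[key] > max_index:
--       max_index = seq_dict[key]
--
--   for key in sequence:
--     if max_index == seq_dict[key]:
--       return key
-- ===== SOURCE B (Python) =====
-- def earliest_modal(sequence):
--   assert sequence
--   stats = {}
--   best = None  # (count, first_index, key) of the current winner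
--   for i, key in enumerate(sequence):
--     if key in stats:
--       cnt, fi = stats[key]
--       cnt += 1
--     else:
--       cnt, fi = 1, i
--     stats[key] = (cnt, fi)
--     if best is None or cnt > best[0] or (cnt == best[0] and fi < best[1]):
--       best = (cnt, fi, key)
--   return best[2]
-- ===== Notes on version B (the rewrite author's own statement) =====
-- stated objective: alternative
-- what changed: B is a single enumerate pass that maintains per-key (count, first_index) stats and a running best under the lexicographic order (larger count, then smaller first index), so A's second full scan of the sequence disappears entirely.
-- outside the precondition, e.g. on earliest_modal([]): A raises AssertionError, B raises AssertionError
import Mathlib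
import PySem

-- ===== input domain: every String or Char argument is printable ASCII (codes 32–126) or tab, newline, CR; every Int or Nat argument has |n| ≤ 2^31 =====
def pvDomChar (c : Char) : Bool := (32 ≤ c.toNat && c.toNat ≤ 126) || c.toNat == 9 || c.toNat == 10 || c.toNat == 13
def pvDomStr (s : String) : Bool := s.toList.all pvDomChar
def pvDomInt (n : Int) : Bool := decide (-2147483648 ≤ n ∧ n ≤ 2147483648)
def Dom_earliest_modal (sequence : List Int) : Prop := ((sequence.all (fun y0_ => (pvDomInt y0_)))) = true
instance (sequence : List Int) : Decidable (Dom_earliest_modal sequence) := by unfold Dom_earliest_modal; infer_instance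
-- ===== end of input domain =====

-- B replaces A's two-stage count-then-rescan by a SINGLE enumerate pass that tracks per-key
-- (count, first_index) and a running best under (larger count, then smaller first index);
-- objective: alternative decomposition, same cost.

-- ===== PORT A =====
-- one loop iteration of A: update the count of `key`, then the running maximum
def stepA (st : PySem.Dict Int Int × Int) (key : Int) : PySem.Dict Int Int × Int :=
  let d := if st.1.contains key then st.1.insert key (st.1.getD key 0 + 1)
           else st.1.insert key 1
  (d, if d.getD key 0 > st.2 then d.getD key 0 else st.2)

def earliest_modal (sequence : List Int) : Int :=
  let st := sequence.foldl stepA (PySem.Dict.empty, 0)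
  -- second scan: return the first key whose count equals max_index (always found when sequence ≠ [])
  ((sequence.find? (fun key => st.2 == st.1.getD key 0)).getD 0)

-- ===== PORT B =====
-- one iteration of B's single pass: p = (i, key); update stats[key] = (cnt, first_index),
-- then the running best if (cnt, fi) beats it lexicographically
def stepB (st : PySem.Dict Int (Int × Int) × Option (Int × Int × Int)) (p : Int × Int) :
    PySem.Dict Int (Int × Int) × Option (Int × Int × Int) :=
  let cf : Int × Int :=
    if st.1.contains p.2 then
      let q := st.1.getD p.2 (0, 0)
      (q.1 + 1, q.2)
    else (1, p.1)
  let stats := st.1.insert p.2 cf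
  let best : Option (Int × Int × Int) :=
    match st.2 with
    | none => some (cf.1, cf.2, p.2)
    | some b => if cf.1 > b.1 ∨ (cf.1 = b.1 ∧ cf.2 < b.2.1) then some (cf.1, cf.2, p.2)
                else some b
  (stats, best)

def earliest_modal_alt (sequence : List Int) : Int :=
  match ((PySem.List.enumerate sequence).foldl stepB (PySem.Dict.empty, none)).2 with
  | some b => b.2.2
  | none => 0  -- unreachable under Pre_: Python's `assert sequence` rules out []

-- ===== PRECONDITION & SPEC =====
-- Pre_ excludes only the empty list, on which Python A (and B) fail the `assert sequence`.
def Pre_earliest_modal (sequence : List Int) : Prop := sequence ≠ []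
instance (sequence : List Int) : Decidable (Pre_earliest_modal sequence) := by
  unfold Pre_earliest_modal; infer_instance
def pvWitness_earliest_modal : List Int := [1, 2, 2]

def Spec_earliest_modal (sequence : List Int) (out : Int) : Prop := out = earliest_modal_alt sequence
instance (sequence : List Int) (out : Int) : Decidable (Spec_earliest_modal sequence out) := by
  unfold Spec_earliest_modal; infer_instance

-- ===== CLAIM (what is proved, stated in full; the proofs are below) =====
def Claim_equal_earliest_modal : Prop := ∀ (sequence : List Int), Dom_earliest_modal sequence → Pre_earliest_modal sequence → Spec_earliest_modal sequence (earliest_modal sequence)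

-- ===== LEMMAS AND PROOFS =====

-- ---- A-side: the fold's dict is the counter, its second component is the max count ----

theorem stepA_eq (st : PySem.Dict Int Int × Int) (key : Int) :
    stepA st key = (st.1.insert key (st.1.getD key 0 + 1), max st.2 (st.1.getD key 0 + 1)) := by
  have hd : (if st.1.contains key then st.1.insert key (st.1.getD key 0 + 1)
      else st.1.insert key 1) = st.1.insert key (st.1.getD key 0 + 1) := by
    by_cases h : st.1.contains key = true
    · simp [h]
    · have h0 := PySem.Dict.getD_of_not_contains st.1 (0 : Int) (by simpa using h)
      simp [h, h0]
  simp only [stepA, hd, PySem.Dict.getD_insert_self]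
  rw [Prod.mk.injEq]
  exact ⟨rfl, by rw [max_def]; split_ifs <;> omega⟩

theorem fst_foldl_stepA (l : List Int) (d : PySem.Dict Int Int) (m : Int) :
    (l.foldl stepA (d, m)).1 = l.foldl (fun d key => d.insert key (d.getD key 0 + 1)) d := by
  induction l generalizing d m with
  | nil => rfl
  | cons x xs ih =>
    simp only [List.foldl_cons, stepA_eq]
    exact ih _ _

theorem snd_ge_m (l : List Int) (d : PySem.Dict Int Int) (m : Int) :
    m ≤ (l.foldl stepA (d, m)).2 := by
  induction l generalizing d m with
  | nil => simp
  | cons x xs ih =>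
    simp only [List.foldl_cons, stepA_eq]
    exact le_trans (le_max_left _ _) (ih _ _)

theorem snd_ge_count (l : List Int) (d : PySem.Dict Int Int) (m : Int) (v : Int) (hv : v ∈ l) :
    d.getD v 0 + (l.count v : Int) ≤ (l.foldl stepA (d, m)).2 := by
  induction l generalizing d m with
  | nil => cases hv
  | cons x xs ih =>
    simp only [List.foldl_cons, stepA_eq]
    by_cases hx : v ∈ xs
    · have h := ih (d.insert x (d.getD x 0 + 1)) (max m (d.getD x 0 + 1)) hx
      rw [PySem.Dict.getD_insert] at h
      by_cases hvx : v = x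
      · subst hvx
        rw [if_pos rfl] at h
        rw [List.count_cons_self]
        push_cast at h ⊢
        omega
      · rw [if_neg hvx] at h
        have hc : List.count v (x :: xs) = List.count v xs := by
          simp [Ne.symm hvx]
        rw [hc]
        exact h
    · have hvx : v = x := by
        rcases List.mem_cons.mp hv with h | h
        · exact h
        · exact absurd h hx
      subst hvx
      have h1 : xs.count v = 0 := List.count_eq_zero_of_not_mem hx
      rw [List.count_cons_self, h1]
      have h2 := snd_ge_m xs (d.insert v (d.getD v 0 + 1)) (max m (d.getD v 0 + 1))
      have h3 : d.getD v 0 + 1 ≤ max m (d.getD v 0 + 1) := le_max_right _ _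
      push_cast
      omega

theorem snd_achieved (l : List Int) (d : PySem.Dict Int Int) (m : Int) :
    (l.foldl stepA (d, m)).2 = m ∨
      ∃ v ∈ l, (l.foldl stepA (d, m)).2 = d.getD v 0 + (l.count v : Int) := by
  induction l generalizing d m with
  | nil => left; rfl
  | cons x xs ih =>
    simp only [List.foldl_cons, stepA_eq]
    rcases ih (d.insert x (d.getD x 0 + 1)) (max m (d.getD x 0 + 1)) with h | ⟨v, hv, h⟩
    · by_cases hm : d.getD x 0 + 1 ≤ m
      · left
        rw [h, max_eq_left hm]
      · by_cases hx : x ∈ xs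
        · exfalso
          have hge := snd_ge_count xs (d.insert x (d.getD x 0 + 1)) (max m (d.getD x 0 + 1)) x hx
          rw [PySem.Dict.getD_insert_self] at hge
          have hc : 0 < xs.count x := List.count_pos_iff.mpr hx
          rw [h, max_eq_right (by omega)] at hge
          omega
        · right
          refine ⟨x, List.mem_cons_self, ?_⟩
          rw [h, max_eq_right (by omega), List.count_cons_self,
            List.count_eq_zero_of_not_mem hx]
          push_cast
          omega
    · right
      refine ⟨v, List.mem_cons_of_mem _ hv, ?_⟩
      rw [PySem.Dict.getD_insert] at h
      by_cases hvx : v = x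
      · subst hvx
        rw [if_pos rfl] at h
        rw [h, List.count_cons_self]
        push_cast
        omega
      · rw [if_neg hvx] at h
        have hc : List.count v (x :: xs) = List.count v xs := by
          simp [Ne.symm hvx]
        rw [h, hc]

-- ---- B-side: the single pass's invariant ----

-- the state B's single pass has after consuming l
def Bstate (l : List Int) : PySem.Dict Int (Int × Int) × Option (Int × Int × Int) :=
  (PySem.List.enumerate l).foldl stepB (PySem.Dict.empty, none)

-- the (cnt, fi) pair stepB computes
def cfB (st : PySem.Dict Int (Int × Int) × Option (Int × Int × Int)) (p : Int × Int) :
    Int × Int :=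
  if st.1.contains p.2 then ((st.1.getD p.2 (0, 0)).1 + 1, (st.1.getD p.2 (0, 0)).2)
  else (1, p.1)

theorem stepB_fst (st : PySem.Dict Int (Int × Int) × Option (Int × Int × Int)) (p : Int × Int) :
    (stepB st p).1 = st.1.insert p.2 (cfB st p) := rfl

theorem stepB_snd_none (st : PySem.Dict Int (Int × Int) × Option (Int × Int × Int))
    (p : Int × Int) (h : st.2 = none) :
    (stepB st p).2 = some ((cfB st p).1, (cfB st p).2, p.2) := by
  simp only [stepB, cfB, h]

theorem stepB_snd_some (st : PySem.Dict Int (Int × Int) × Option (Int × Int × Int))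
    (p : Int × Int) (b : Int × Int × Int) (h : st.2 = some b) :
    (stepB st p).2 =
      if (cfB st p).1 > b.1 ∨ ((cfB st p).1 = b.1 ∧ (cfB st p).2 < b.2.1)
      then some ((cfB st p).1, (cfB st p).2, p.2) else some b := by
  simp only [stepB, cfB, h]

-- what is true of a populated best slot after consuming l
def BBest (l : List Int) (b : Int × Int × Int) : Prop :=
  (∃ j : Nat, PySem.List.index? l b.2.2 = some j ∧
      b.1 = (l.count b.2.2 : Int) ∧ b.2.1 = (j : Int)) ∧
  ∀ v ∈ l, ∀ jv : Nat, PySem.List.index? l v = some jv →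
    ((l.count v : Int) < b.1 ∨ ((l.count v : Int) = b.1 ∧ b.2.1 ≤ (jv : Int)))

def BInv (l : List Int) : Prop :=
  (∀ v : Int, (Bstate l).1.get? v =
      (PySem.List.index? l v).map (fun j : Nat => ((l.count v : Int), (j : Int)))) ∧
  ((Bstate l).2 = none → l = []) ∧
  (∀ b : Int × Int × Int, (Bstate l).2 = some b → BBest l b)

theorem Bstate_append (l : List Int) (x : Int) :
    Bstate (l ++ [x]) = stepB (Bstate l) ((l.length : Int), x) := by
  unfold Bstate
  rw [PySem.List.enumerate_append, List.foldl_append, PySem.List.enumerate_cons,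
    PySem.List.enumerate_nil]
  norm_num

theorem index?_lt_length (l : List Int) (v : Int) (j : Nat)
    (h : PySem.List.index? l v = some j) : j < l.length := by
  obtain ⟨hk, -, -⟩ := PySem.List.getElem_of_index?_eq_some h
  exact hk

theorem count_pos_int (l : List Int) (v : Int) (h : v ∈ l) : (1 : Int) ≤ (l.count v : Int) := by
  have := List.count_pos_iff.mpr h
  omega

theorem bInv (l : List Int) : BInv l := by
  induction l using List.reverseRecOn with
  | nil =>
    exact ⟨fun v => rfl, fun _ => rfl, fun b hb => by cases hb⟩
  | append_singleton p x ih =>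
    obtain ⟨ihs, ihn, ihb⟩ := ih
    have hcne : ∀ v : Int, v ≠ x → (p ++ [x]).count v = p.count v := by
      intro v hv; simp [List.count_append, Ne.symm hv]
    have hcx : ((p ++ [x]).count x : Int) = (p.count x : Int) + 1 := by
      simp [List.count_append]
    have hidx_mem : ∀ v : Int, v ∈ p →
        PySem.List.index? (p ++ [x]) v = PySem.List.index? p v :=
      fun v hv => PySem.List.index?_append_of_mem [x] hv
    have hstep := Bstate_append p x
    by_cases hmem : x ∈ p
    · -- x was seen before: cf = (old count + 1, old first index)
      obtain ⟨jx, hjx⟩ : ∃ jx, PySem.List.index? p x = some jx :=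
        Option.isSome_iff_exists.mp ((PySem.List.index?_isSome_iff p x).mpr hmem)
      have hget : (Bstate p).1.get? x = some ((p.count x : Int), (jx : Int)) := by
        rw [ihs x, hjx]; rfl
      have hcont : (Bstate p).1.contains x = true := by
        rw [PySem.Dict.contains_eq_isSome_get?, hget]; rfl
      have hgetD : (Bstate p).1.getD x (0, 0) = ((p.count x : Int), (jx : Int)) :=
        PySem.Dict.getD_of_get?_eq_some _ _ hget
      have hcf : cfB (Bstate p) ((p.length : Int), x) = ((p.count x : Int) + 1, (jx : Int)) := by
        simp only [cfB, hcont, if_true, hgetD]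
      have hidxx : PySem.List.index? (p ++ [x]) x = some jx := by
        rw [hidx_mem x hmem, hjx]
      have hpne : p ≠ [] := by rintro rfl; cases hmem
      refine ⟨?_, ?_, ?_⟩
      · intro v
        rw [hstep, stepB_fst, hcf, PySem.Dict.get?_insert]
        by_cases hvx : v = x
        · subst hvx
          rw [if_pos rfl, hidxx]
          simp only [Option.map_some]
          rw [hcx]
        · rw [if_neg hvx, ihs v]
          by_cases hvp : v ∈ p
          · rw [hidx_mem v hvp, hcne v hvx]
          · rw [(PySem.List.index?_eq_none_iff p v).mpr hvp,
              (PySem.List.index?_eq_none_iff _ v).mpr (by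
                intro h
                rcases List.mem_append.mp h with h | h
                · exact hvp h
                · exact hvx (List.mem_singleton.mp h))]
            rfl
      · intro hnone
        exfalso
        cases hb : (Bstate p).2 with
        | none => rw [hstep, stepB_snd_none _ _ hb] at hnone; cases hnone
        | some b =>
          rw [hstep, stepB_snd_some _ _ b hb] at hnone
          split_ifs at hnone
      · intro b' hb'
        cases hb : (Bstate p).2 with
        | none => exact absurd (ihn hb) hpne
        | some b =>
          obtain ⟨⟨jb, hjb, hb1, hb2⟩, hbnd⟩ := ihb b hb
          have hbk : b.2.2 ∈ p :=
            (PySem.List.index?_isSome_iff p b.2.2).mp (by rw [hjb]; rfl)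
          rw [hstep, stepB_snd_some _ _ b hb, hcf] at hb'
          by_cases hcond : ((p.count x : Int) + 1 > b.1 ∨
              ((p.count x : Int) + 1 = b.1 ∧ (jx : Int) < b.2.1))
          · rw [if_pos hcond] at hb'
            obtain rfl : ((p.count x : Int) + 1, (jx : Int), x) = b' := Option.some.inj hb'
            refine ⟨⟨jx, hidxx, by rw [hcx], rfl⟩, ?_⟩
            intro v hv jv hjv
            dsimp only
            by_cases hvx : v = x
            · subst hvx
              have : jv = jx := by rw [hidxx] at hjv; exact (Option.some.inj hjv).symm
              subst this
              right
              exact ⟨by rw [hcx], le_refl _⟩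
            · have hvp : v ∈ p := by
                rcases List.mem_append.mp hv with h | h
                · exact h
                · exact absurd (List.mem_singleton.mp h) hvx
              have hjv' : PySem.List.index? p v = some jv := by
                rw [hidx_mem v hvp] at hjv; exact hjv
              have hold := hbnd v hvp jv hjv'
              have hcv : ((p ++ [x]).count v : Int) = (p.count v : Int) := by
                rw [hcne v hvx]
              rw [hcv]
              rcases hcond with hgt | ⟨heq, hlt⟩
              · left
                rcases hold with h | ⟨h, -⟩ <;> omega
              · rcases hold with h | ⟨h, h2⟩
                · left; omega
                · right; exact ⟨by omega, by omega⟩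
          · rw [if_neg hcond] at hb'
            obtain rfl : b = b' := Option.some.inj hb'
            obtain ⟨hle', hnc⟩ := not_or.mp hcond
            have hle : (p.count x : Int) + 1 ≤ b.1 := by omega
            have himp : (p.count x : Int) + 1 = b.1 → b.2.1 ≤ (jx : Int) := by
              intro he
              by_contra hlt
              exact hnc ⟨he, by omega⟩
            have hbkx : b.2.2 ≠ x := by
              intro h
              rw [h] at hb1
              omega
            refine ⟨⟨jb, by rw [hidx_mem _ hbk]; exact hjb,
              by rw [hcne _ hbkx]; exact hb1, hb2⟩, ?_⟩
            intro v hv jv hjv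
            by_cases hvx : v = x
            · subst hvx
              have : jv = jx := by rw [hidxx] at hjv; exact (Option.some.inj hjv).symm
              subst this
              rw [hcx]
              by_cases he : (p.count v : Int) + 1 = b.1
              · right; exact ⟨he, himp he⟩
              · left; omega
            · have hvp : v ∈ p := by
                rcases List.mem_append.mp hv with h | h
                · exact h
                · exact absurd (List.mem_singleton.mp h) hvx
              have hjv' : PySem.List.index? p v = some jv := by
                rw [hidx_mem v hvp] at hjv; exact hjv
              have hcv : ((p ++ [x]).count v : Int) = (p.count v : Int) := by
                rw [hcne v hvx]
              rw [hcv]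
              exact hbnd v hvp jv hjv'
    · -- x is new: cf = (1, p.length)
      have hget : (Bstate p).1.get? x = none := by
        rw [ihs x, (PySem.List.index?_eq_none_iff p x).mpr hmem]; rfl
      have hcont : (Bstate p).1.contains x = false := by
        rw [PySem.Dict.contains_eq_isSome_get?, hget]; rfl
      have hcf : cfB (Bstate p) ((p.length : Int), x) = (1, (p.length : Int)) := by
        simp only [cfB, hcont, Bool.false_eq_true, if_false]
      have hidxx : PySem.List.index? (p ++ [x]) x = some p.length :=
        PySem.List.index?_append_singleton_self p x hmem
      have hcx1 : ((p ++ [x]).count x : Int) = 1 := by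
        rw [hcx, Nat.cast_eq_zero.mpr (List.count_eq_zero_of_not_mem hmem)]
        omega
      refine ⟨?_, ?_, ?_⟩
      · intro v
        rw [hstep, stepB_fst, hcf, PySem.Dict.get?_insert]
        by_cases hvx : v = x
        · subst hvx
          rw [if_pos rfl, hidxx]
          simp only [Option.map_some]
          rw [hcx1]
        · rw [if_neg hvx, ihs v]
          by_cases hvp : v ∈ p
          · rw [hidx_mem v hvp, hcne v hvx]
          · rw [(PySem.List.index?_eq_none_iff p v).mpr hvp,
              (PySem.List.index?_eq_none_iff _ v).mpr (by
                intro h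
                rcases List.mem_append.mp h with h | h
                · exact hvp h
                · exact hvx (List.mem_singleton.mp h))]
            rfl
      · intro hnone
        exfalso
        cases hb : (Bstate p).2 with
        | none => rw [hstep, stepB_snd_none _ _ hb] at hnone; cases hnone
        | some b =>
          rw [hstep, stepB_snd_some _ _ b hb] at hnone
          split_ifs at hnone
      · intro b' hb'
        cases hb : (Bstate p).2 with
        | none =>
          obtain rfl : p = [] := ihn hb
          rw [hstep, stepB_snd_none _ _ hb, hcf] at hb'
          obtain rfl : ((1 : Int), ((List.length ([] : List Int) : Int)), x) = b' :=
            Option.some.inj hb'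
          refine ⟨⟨0, by rw [hidxx]; rfl, by rw [hcx1], by simp⟩, ?_⟩
          intro v hv jv hjv
          dsimp only
          have hvx : v = x := by simpa using hv
          subst hvx
          have : jv = 0 := by
            rw [hidxx] at hjv
            simpa using (Option.some.inj hjv).symm
          subst this
          right
          exact ⟨by rw [hcx1], by simp⟩
        | some b =>
          obtain ⟨⟨jb, hjb, hb1, hb2⟩, hbnd⟩ := ihb b hb
          have hbk : b.2.2 ∈ p :=
            (PySem.List.index?_isSome_iff p b.2.2).mp (by rw [hjb]; rfl)
          have hb1ge : (1 : Int) ≤ b.1 := by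
            rw [hb1]; exact count_pos_int p b.2.2 hbk
          have hjblt : jb < p.length := index?_lt_length p b.2.2 jb hjb
          rw [hstep, stepB_snd_some _ _ b hb, hcf] at hb'
          have hcondF : ¬ ((1 : Int) > b.1 ∨ ((1 : Int) = b.1 ∧ (p.length : Int) < b.2.1)) := by
            rintro (h | ⟨h1, h2⟩)
            · omega
            · rw [hb2] at h2; omega
          rw [if_neg hcondF] at hb'
          obtain rfl : b = b' := Option.some.inj hb'
          have hbkx : b.2.2 ≠ x := fun h => hmem (h ▸ hbk)
          refine ⟨⟨jb, by rw [hidx_mem _ hbk]; exact hjb,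
            by rw [hcne _ hbkx]; exact hb1, hb2⟩, ?_⟩
          intro v hv jv hjv
          by_cases hvx : v = x
          · subst hvx
            have : jv = p.length := by rw [hidxx] at hjv; exact (Option.some.inj hjv).symm
            subst this
            rw [hcx1]
            by_cases he : (1 : Int) = b.1
            · right
              refine ⟨he, ?_⟩
              rw [hb2]
              omega
            · left; omega
          · have hvp : v ∈ p := by
              rcases List.mem_append.mp hv with h | h
              · exact h
              · exact absurd (List.mem_singleton.mp h) hvx
            have hjv' : PySem.List.index? p v = some jv := by
              rw [hidx_mem v hvp] at hjv; exact hjv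
            have hcv : ((p ++ [x]).count v : Int) = (p.count v : Int) := by
              rw [hcne v hvx]
            rw [hcv]
            exact hbnd v hvp jv hjv'

-- find? over a decomposition whose prefix all fails the predicate
theorem find?_concat (pred : Int → Bool) (pre suf : List Int) (k : Int)
    (h1 : ∀ a ∈ pre, pred a = false) (h2 : pred k = true) :
    List.find? pred (pre ++ k :: suf) = some k := by
  induction pre with
  | nil => exact List.find?_cons_of_pos (l := suf) h2
  | cons a rest ih =>
    rw [List.cons_append, List.find?_cons_of_neg]
    · exact ih (fun a ha => h1 a (List.mem_cons_of_mem _ ha))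
    · simp [h1 a List.mem_cons_self]

-- ===== VERDICT (by name: the statement is the Claim_ definition above) =====
theorem earliest_modal_spec : Claim_equal_earliest_modal := by
  intro l _hDom hPre
  unfold Spec_earliest_modal
  obtain ⟨hs, hn, hbest⟩ := bInv l
  cases hb : (Bstate l).2 with
  | none => exact absurd (hn hb) hPre
  | some b =>
    obtain ⟨⟨jb, hjb, hb1, hb2⟩, hbnd⟩ := hbest b hb
    have hbk : b.2.2 ∈ l :=
      (PySem.List.index?_isSome_iff l b.2.2).mp (by rw [hjb]; rfl)
    have hRHS : earliest_modal_alt l = b.2.2 := by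
      unfold earliest_modal_alt
      have : ((PySem.List.enumerate l).foldl stepB (PySem.Dict.empty, none)).2 = some b := hb
      rw [this]
    rw [hRHS]
    -- A's side
    simp only [earliest_modal]
    set mA := (l.foldl stepA (PySem.Dict.empty, (0 : Int))).2 with hmA
    have hub : ∀ v ∈ l, ((l.count v : Int)) ≤ mA := by
      intro v hv
      have h := snd_ge_count l PySem.Dict.empty 0 v hv
      rwa [PySem.Dict.getD_empty, zero_add] at h
    have hach : ∃ v ∈ l, mA = (l.count v : Int) := by
      rcases snd_achieved l PySem.Dict.empty 0 with h | ⟨v, hv, h⟩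
      · exfalso
        have h1 := hub b.2.2 hbk
        have h2 := count_pos_int l b.2.2 hbk
        omega
      · exact ⟨v, hv, by rwa [PySem.Dict.getD_empty, zero_add] at h⟩
    -- the max equals b.1
    have hble : ∀ v ∈ l, ((l.count v : Int)) ≤ b.1 := by
      intro v hv
      obtain ⟨jv, hjv⟩ : ∃ jv, PySem.List.index? l v = some jv :=
        Option.isSome_iff_exists.mp ((PySem.List.index?_isSome_iff l v).mpr hv)
      rcases hbnd v hv jv hjv with h | ⟨h, -⟩ <;> omega
    have hmb : mA = b.1 := by
      obtain ⟨v0, hv0, hv0e⟩ := hach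
      have h1 := hble v0 hv0
      have h2 := hub b.2.2 hbk
      omega
    -- rewrite A's predicate to compare counts
    have hfst : (l.foldl stepA (PySem.Dict.empty, (0 : Int))).1 = PySem.Dict.counter l := by
      rw [fst_foldl_stepA, PySem.Dict.foldl_insert_getD_add_one_eq_counter]
    have hpred : (fun key => mA == (l.foldl stepA (PySem.Dict.empty, (0 : Int))).1.getD key 0) =
        (fun v => mA == ((l.count v : Int))) := by
      funext v
      rw [hfst, PySem.Dict.getD_counter]
    rw [hpred]
    -- find? returns b.2.2
    obtain ⟨pre, suf, hl, hlen, hnotin⟩ := (PySem.List.index?_eq_some_iff _ _ _).mp hjb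
    have hfail : ∀ a ∈ pre, (mA == ((l.count a : Int))) = false := by
      intro a ha
      rw [beq_eq_false_iff_ne]
      intro hcontra
      have hal : a ∈ l := by rw [hl]; exact List.mem_append_left _ ha
      obtain ⟨ja, hja⟩ : ∃ ja, PySem.List.index? pre a = some ja :=
        Option.isSome_iff_exists.mp ((PySem.List.index?_isSome_iff pre a).mpr ha)
      have hjal : PySem.List.index? l a = some ja := by
        rw [hl, PySem.List.index?_append_of_mem _ ha, hja]
      have hjalt : ja < pre.length := index?_lt_length pre a ja hja
      rcases hbnd a hal ja hjal with h | ⟨h, h2⟩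
      · omega
      · rw [hb2] at h2; omega
    have hyes : (mA == ((l.count b.2.2 : Int))) = true := by
      rw [beq_iff_eq]
      omega
    have hfind : List.find? (fun v => mA == ((l.count v : Int))) l = some b.2.2 := by
      have hfc := find?_concat (fun v => mA == ((l.count v : Int))) pre suf b.2.2 hfail hyes
      rw [← hl] at hfc
      exact hfc
    rw [hfind]
    rfl
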